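-- pv_equiv track=rewrite | github.com/siddhhhhh/MiniProject | agents/credibility_analyst.py | _detect_bias
-- ===== SOURCE A (Python) =====
-- def _detect_bias(content: str, source_type: str) -> str:
--     """Simple bias detection"""
--     if not content:
--         return "Neutral"
--
--     content_lower = content.lower()
--
--     # Pro-company indicators
--     pro_indicators = ["revolutionary", "groundbreaking", "leader", "best", "innovative"]
--     pro_count = sum(1 for ind in pro_indicators if ind in content_lower)
--
--     # Critical indicators
--     critical_indicators = ["violation", "accused", "greenwashing", "overstated", "failed"]
--     critical_count = sum(1 for ind in critical_indicators if ind in content_lower)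
--
--     if pro_count > critical_count + 2:
--         return "Pro-company"
--     elif critical_count > pro_count + 2:
--         return "Anti-company"
--     else:
--         return "Neutral"
-- ===== SOURCE B (Python) =====
-- def _detect_bias(content: str, source_type: str) -> str:
--     """Bias detection by one left-to-right scan of the text.
--
--     Instead of testing each keyword against the whole text with `in`
--     (two count comprehensions, one per keyword list), walk the lowered
--     text once: at every position record any keyword that starts there,
--     then sum the signed weights of the keywords actually found.
--     """
--     weights = {
--         "revolutionary": 1, "groundbreaking": 1, "leader": 1,
--         "best": 1, "innovative": 1,
--         "violation": -1, "accused": -1, "greenwashing": -1,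
--         "overstated": -1, "failed": -1,
--     }
--     text = content.lower()
--     found = set()
--     for i in range(len(text)):
--         for kw in weights:
--             if text.startswith(kw, i):
--                 found.add(kw)
--     net = sum(w for kw, w in weights.items() if kw in found)
--     if net > 2:
--         return "Pro-company"
--     if net < -2:
--         return "Anti-company"
--     return "Neutral"
-- ===== Notes on version B (the rewrite author's own statement) =====
-- stated objective: alternative
-- what changed: Replaces A's keyword-driven passes (two count comprehensions testing each keyword with `in` over the whole text, then a two-sided threshold comparison) by a position-driven scan: one walk over the lowered text collecting into a set every keyword that starts at some position, then a single signed net score (sum of +1/-1 weights of found keywords) classified by net > 2 / net < -2; the empty-content guard is dropped since an empty scan yields net 0, i.e. Neutral.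
import Mathlib
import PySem

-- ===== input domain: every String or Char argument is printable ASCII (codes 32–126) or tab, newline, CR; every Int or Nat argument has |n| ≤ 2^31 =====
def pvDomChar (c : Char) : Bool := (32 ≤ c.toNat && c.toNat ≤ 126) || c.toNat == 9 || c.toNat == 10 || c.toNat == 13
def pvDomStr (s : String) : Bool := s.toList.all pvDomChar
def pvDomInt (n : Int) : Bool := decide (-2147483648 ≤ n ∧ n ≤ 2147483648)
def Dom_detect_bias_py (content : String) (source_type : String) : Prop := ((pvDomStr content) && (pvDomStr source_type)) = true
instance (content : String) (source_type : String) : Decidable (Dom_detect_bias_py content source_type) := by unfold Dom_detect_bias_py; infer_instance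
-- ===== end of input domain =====

-- B replaces A's keyword-driven count passes by one position-driven scan of the text
-- collecting found keywords into a set, summed as one signed net score; return value only.

-- ===== PORT A =====
def detect_bias_py (content : String) (source_type : String) : String :=
  if content == "" then "Neutral"
  else
    let content_lower := PySem.Str.lower content
    let pro_indicators := ["revolutionary", "groundbreaking", "leader", "best", "innovative"]
    let pro_count : Int := ((pro_indicators.filter (fun ind => PySem.Str.isIn ind content_lower)).length : Int)
    let critical_indicators := ["violation", "accused", "greenwashing", "overstated", "failed"]
    let critical_count : Int := ((critical_indicators.filter (fun ind => PySem.Str.isIn ind content_lower)).length : Int)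
    if pro_count > critical_count + 2 then "Pro-company"
    else if critical_count > pro_count + 2 then "Anti-company"
    else "Neutral"

-- ===== PORT B =====
-- the dict 'weights' of Source B, as an association list in insertion order
def pvWeights : List (String × Int) :=
  [("revolutionary", 1), ("groundbreaking", 1), ("leader", 1), ("best", 1), ("innovative", 1),
   ("violation", -1), ("accused", -1), ("greenwashing", -1), ("overstated", -1), ("failed", -1)]

def detect_bias_py_alt (content : String) (source_type : String) : String :=
  let text := (PySem.Str.lower content).toList
  let found : PySem.Set String :=
    (PySem.List.pyRange 0 text.length 1).foldl
      (fun fnd i => pvWeights.foldl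
        (fun f kw =>
          -- text.startswith(kw, i): exact as startswith on the suffix slice text[i:] (0 ≤ i here)
          if PySem.Chars.startswith (PySem.List.slice text (some i) none) kw.1.toList
          then PySem.Set.add f kw.1 else f) fnd)
      PySem.Set.empty
  let net : Int := pvWeights.foldl
    (fun acc kw => if PySem.Set.contains found kw.1 then acc + kw.2 else acc) 0
  if net > 2 then "Pro-company"
  else if net < -2 then "Anti-company"
  else "Neutral"

-- ===== PRECONDITION & SPEC =====
def Spec_detect_bias_py (content : String) (source_type : String) (out : String) : Prop := out = detect_bias_py_alt content source_type
instance (content : String) (source_type : String) (out : String) : Decidable (Spec_detect_bias_py content source_type out) := by unfold Spec_detect_bias_py; infer_instance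

-- ===== CLAIM =====
def Claim_equal_detect_bias_py : Prop := ∀ (content : String) (source_type : String), Dom_detect_bias_py content source_type → Spec_detect_bias_py content source_type (detect_bias_py content source_type)

-- ===== LEMMAS AND PROOFS =====

-- membership after the inner fold (one text position, all keywords)
theorem mem_inner_fold (ws : List (String × Int)) (c : String × Int → Bool)
    (f : PySem.Set String) (x : String) :
    x ∈ ws.foldl (fun f kw => if c kw then PySem.Set.add f kw.1 else f) f ↔
      x ∈ f ∨ ∃ p ∈ ws, p.1 = x ∧ c p = true := by
  induction ws generalizing f with
  | nil => simp
  | cons hd tl ih =>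
    simp only [List.foldl_cons]
    by_cases h : c hd = true
    · rw [if_pos h]
      simp only [ih, PySem.Set.mem_add, List.mem_cons]
      constructor
      · rintro ((hf | rfl) | ⟨p, hp, hx, hc⟩)
        · exact Or.inl hf
        · exact Or.inr ⟨hd, Or.inl rfl, rfl, h⟩
        · exact Or.inr ⟨p, Or.inr hp, hx, hc⟩
      · rintro (hf | ⟨p, (rfl | hp), hx, hc⟩)
        · exact Or.inl (Or.inl hf)
        · exact Or.inl (Or.inr hx.symm)
        · exact Or.inr ⟨p, hp, hx, hc⟩
    · rw [if_neg h]
      simp only [ih, List.mem_cons]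
      constructor
      · rintro (hf | ⟨p, hp, hx, hc⟩)
        · exact Or.inl hf
        · exact Or.inr ⟨p, Or.inr hp, hx, hc⟩
      · rintro (hf | ⟨p, (rfl | hp), hx, hc⟩)
        · exact Or.inl hf
        · exact absurd hc h
        · exact Or.inr ⟨p, hp, hx, hc⟩

-- membership after the full scan (all positions)
theorem mem_scan_fold (l : List Int) (text : List Char) (f : PySem.Set String) (x : String) :
    x ∈ l.foldl
        (fun fnd i => pvWeights.foldl
          (fun f kw =>
            if PySem.Chars.startswith (PySem.List.slice text (some i)) kw.1.toList
            then PySem.Set.add f kw.1 else f) fnd) f ↔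
      x ∈ f ∨ ∃ i ∈ l, ∃ p ∈ pvWeights, p.1 = x ∧
        PySem.Chars.startswith (PySem.List.slice text (some i)) p.1.toList = true := by
  induction l generalizing f with
  | nil => simp
  | cons hd tl ih =>
    simp only [List.foldl_cons, ih, mem_inner_fold, List.mem_cons]
    constructor
    · rintro ((hf | ⟨p, hp, hx, hc⟩) | ⟨i, hi, p, hp, hx, hc⟩)
      · exact Or.inl hf
      · exact Or.inr ⟨hd, Or.inl rfl, p, hp, hx, hc⟩
      · exact Or.inr ⟨i, Or.inr hi, p, hp, hx, hc⟩
    · rintro (hf | ⟨i, (rfl | hi), p, hp, hx, hc⟩)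
      · exact Or.inl (Or.inl hf)
      · exact Or.inl (Or.inr ⟨p, hp, hx, hc⟩)
      · exact Or.inr ⟨i, hi, p, hp, hx, hc⟩

-- a nonempty keyword starts at some scanned position iff it is a substring
theorem exists_startswith_iff_isIn (text kw : List Char) (hkw : kw ≠ []) :
    (∃ i ∈ PySem.List.pyRange 0 (text.length : Int),
       PySem.Chars.startswith (PySem.List.slice text (some i)) kw = true) ↔
      PySem.Chars.isIn kw text = true := by
  rw [← PySem.Chars.exists_prefix_drop_iff_isIn]
  constructor
  · rintro ⟨i, hi, h⟩
    rcases PySem.List.mem_pyRange_one.mp hi with ⟨h0, _⟩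
    rw [PySem.List.slice_from _ h0] at h
    exact ⟨i.toNat, (PySem.Chars.startswith_iff _ _).mp h⟩
  · rintro ⟨j, hj⟩
    have hjlt : j < text.length := by
      by_contra hge
      have hnil : text.drop j = [] := List.drop_eq_nil_of_le (by omega)
      rw [hnil] at hj
      exact hkw (List.prefix_nil.mp hj)
    refine ⟨(j : Int), PySem.List.mem_pyRange_one.mpr ⟨by positivity, by exact_mod_cast hjlt⟩, ?_⟩
    rw [PySem.List.slice_from _ (by positivity)]
    simp only [Int.toNat_natCast]
    exact (PySem.Chars.startswith_iff _ _).mpr hj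

-- the scan finds exactly the keywords occurring in the text
theorem contains_found (text : List Char) (k : String) (hk : k.toList ≠ [])
    (hmem : ∃ p ∈ pvWeights, p.1 = k) :
    PySem.Set.contains
      ((PySem.List.pyRange 0 (text.length : Int)).foldl
        (fun fnd i => pvWeights.foldl
          (fun f kw =>
            if PySem.Chars.startswith (PySem.List.slice text (some i)) kw.1.toList
            then PySem.Set.add f kw.1 else f) fnd)
        PySem.Set.empty) k
      = PySem.Chars.isIn k.toList text := by
  rw [Bool.eq_iff_iff]
  rw [show (PySem.Set.contains _ k = true) ↔
        k ∈ ((PySem.List.pyRange 0 (text.length : Int)).foldl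
          (fun fnd i => pvWeights.foldl
            (fun f kw =>
              if PySem.Chars.startswith (PySem.List.slice text (some i)) kw.1.toList
              then PySem.Set.add f kw.1 else f) fnd)
          PySem.Set.empty) from by simp [PySem.Set.contains]]
  rw [mem_scan_fold]
  constructor
  · rintro (h | ⟨i, hi, p, hp, rfl, hsw⟩)
    · simp [PySem.Set.empty] at h
    · exact (exists_startswith_iff_isIn _ _ hk).mp ⟨i, hi, hsw⟩
  · intro hin
    rcases hmem with ⟨p, hp, hpk⟩
    rcases (exists_startswith_iff_isIn _ _ hk).mpr hin with ⟨i, hi, hsw⟩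
    exact Or.inr ⟨i, hi, p, hp, hpk, by rw [hpk]; exact hsw⟩

-- the net fold over the scanned set equals the net fold over substring tests
theorem net_fold_eq (text : List Char) :
    pvWeights.foldl
      (fun acc kw =>
        if PySem.Set.contains
            ((PySem.List.pyRange 0 (text.length : Int)).foldl
              (fun fnd i => pvWeights.foldl
                (fun f kw =>
                  if PySem.Chars.startswith (PySem.List.slice text (some i)) kw.1.toList
                  then PySem.Set.add f kw.1 else f) fnd)
              PySem.Set.empty) kw.1
        then acc + kw.2 else acc) 0
    = pvWeights.foldl
      (fun acc kw => if PySem.Chars.isIn kw.1.toList text then acc + kw.2 else acc) 0 := by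
  apply PySem.List.foldl_congr_mem
  intro acc kw hkw
  rw [contains_found text kw.1 (by fin_cases hkw <;> decide) ⟨kw, hkw, rfl⟩]

set_option maxHeartbeats 2000000 in
theorem detect_bias_eq (content source_type : String) :
    detect_bias_py content source_type = detect_bias_py_alt content source_type := by
  simp only [detect_bias_py, detect_bias_py_alt]
  by_cases h : content == ""
  · rw [if_pos h, eq_of_beq h]
    decide
  · rw [if_neg h]
    simp only [PySem.Str.toList_lower]
    rw [net_fold_eq]
    simp only [pvWeights, List.foldl_cons, List.foldl_nil, List.filter_cons, List.filter_nil,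
      PySem.Str.isIn_eq, PySem.Str.toList_lower]
    generalize PySem.Chars.isIn "revolutionary".toList (PySem.Chars.lower content.toList) = b1
    generalize PySem.Chars.isIn "groundbreaking".toList (PySem.Chars.lower content.toList) = b2
    generalize PySem.Chars.isIn "leader".toList (PySem.Chars.lower content.toList) = b3
    generalize PySem.Chars.isIn "best".toList (PySem.Chars.lower content.toList) = b4
    generalize PySem.Chars.isIn "innovative".toList (PySem.Chars.lower content.toList) = b5
    generalize PySem.Chars.isIn "violation".toList (PySem.Chars.lower content.toList) = b6
    generalize PySem.Chars.isIn "accused".toList (PySem.Chars.lower content.toList) = b7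
    generalize PySem.Chars.isIn "greenwashing".toList (PySem.Chars.lower content.toList) = b8
    generalize PySem.Chars.isIn "overstated".toList (PySem.Chars.lower content.toList) = b9
    generalize PySem.Chars.isIn "failed".toList (PySem.Chars.lower content.toList) = b10
    revert b1 b2 b3 b4 b5 b6 b7 b8 b9 b10
    decide

-- ===== VERDICT =====
theorem detect_bias_py_spec : Claim_equal_detect_bias_py := by
  intro content source_type _
  exact detect_bias_eq content source_type
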